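-- pv_equiv track=rewrite | github.com/fbrausse/smlp | src/smlp_py/smlp_terms.py | sum_operator_counts
-- ===== SOURCE A (Python) =====
-- def sum_operator_counts(operator_counts_list):
--     # Initialize a dictionary to store the sum of operator counts
--     summed_counts = {}
--
--     # Iterate over each operator_counts dictionary in the list
--     for operator_counts in operator_counts_list:
--         # Iterate over each key-value pair in the current dictionary
--         for operator, count in operator_counts.items():
--             # Add the count to the summed_counts dictionary
--             if operator in summed_counts:
--                 summed_counts[operator] += count
--             else:
--                 summed_counts[operator] = count
--
--     return summed_counts
-- ===== SOURCE B (Python) =====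
-- def sum_operator_counts(operator_counts_list):
--     keys = dict.fromkeys(k for d in operator_counts_list for k in d)
--     return {k: sum(d.get(k, 0) for d in operator_counts_list) for k in keys}
-- ===== Notes on version B (the rewrite author's own statement) =====
-- stated objective: alternative
-- what changed: Replaces the single accumulating pass (mutating a running dict entry by entry) with a key-indexed scheme: first collect the distinct keys in first-seen order with dict.fromkeys, then compute each key's total by scanning every dict once per key.
import Mathlib
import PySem

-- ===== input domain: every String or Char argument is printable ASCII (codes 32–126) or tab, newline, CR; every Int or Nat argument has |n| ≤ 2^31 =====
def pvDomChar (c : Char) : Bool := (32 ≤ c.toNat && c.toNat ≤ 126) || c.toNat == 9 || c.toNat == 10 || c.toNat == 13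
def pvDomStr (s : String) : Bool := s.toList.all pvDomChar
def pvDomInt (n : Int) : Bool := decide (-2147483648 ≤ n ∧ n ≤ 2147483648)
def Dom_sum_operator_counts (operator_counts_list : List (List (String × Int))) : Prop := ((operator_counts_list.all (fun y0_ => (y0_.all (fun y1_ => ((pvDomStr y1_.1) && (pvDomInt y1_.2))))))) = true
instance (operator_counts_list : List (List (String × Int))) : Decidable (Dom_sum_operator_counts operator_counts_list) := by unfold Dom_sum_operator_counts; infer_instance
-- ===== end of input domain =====

-- B replaces A's single accumulating pass with a key-indexed scheme (distinct keys first, then one total per key); alternative decomposition, not claimed faster.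

-- ===== PORT A =====
def sum_operator_counts (operator_counts_list : List (List (String × Int))) : List (String × Int) :=
  (operator_counts_list.foldl (fun summed_counts operator_counts =>
      operator_counts.foldl (fun summed_counts p =>
        if summed_counts.contains p.1 then
          summed_counts.insert p.1 (summed_counts.getD p.1 0 + p.2)
        else
          summed_counts.insert p.1 p.2) summed_counts)
    (PySem.Dict.empty : PySem.Dict String Int)).items

-- ===== PORT B =====
def sum_operator_counts_alt (operator_counts_list : List (List (String × Int))) : List (String × Int) :=
  let keys := PySem.List.dedup (operator_counts_list.flatMap (fun d => d.map Prod.fst))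
  keys.map (fun k => (k, operator_counts_list.foldl (fun s d => s + (PySem.Dict.mk d).getD k 0) 0))

-- ===== PRECONDITION & SPEC =====
-- Pre_ requires each inner association list to have distinct keys: it encodes a Python dict, which cannot hold duplicate keys, so no excluded input corresponds to an input A accepts.
def Pre_sum_operator_counts (operator_counts_list : List (List (String × Int))) : Prop :=
  ∀ d ∈ operator_counts_list, (d.map Prod.fst).Nodup
instance (operator_counts_list : List (List (String × Int))) : Decidable (Pre_sum_operator_counts operator_counts_list) := by unfold Pre_sum_operator_counts; infer_instance
def pvWitness_sum_operator_counts : (List (List (String × Int))) := [[("a", 1), ("b", 2)], [("a", 3)]]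
def Spec_sum_operator_counts (operator_counts_list : List (List (String × Int))) (out : List (String × Int)) : Prop := out = sum_operator_counts_alt operator_counts_list
instance (operator_counts_list : List (List (String × Int))) (out : List (String × Int)) : Decidable (Spec_sum_operator_counts operator_counts_list out) := by unfold Spec_sum_operator_counts; infer_instance

-- ===== CLAIM (what is proved, stated in full; the proofs are below) =====
def Claim_equal_sum_operator_counts : Prop := ∀ (operator_counts_list : List (List (String × Int))), Dom_sum_operator_counts operator_counts_list → Pre_sum_operator_counts operator_counts_list → Spec_sum_operator_counts operator_counts_list (sum_operator_counts operator_counts_list)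

-- ===== LEMMAS AND PROOFS =====

-- A's two branches are one insert: when the key is absent, getD is 0.
theorem stepA_eq (d : PySem.Dict String Int) (p : String × Int) :
    (if d.contains p.1 then d.insert p.1 (d.getD p.1 0 + p.2) else d.insert p.1 p.2)
      = d.insert p.1 (d.getD p.1 0 + p.2) := by
  by_cases h : d.contains p.1 = true
  · simp [h]
  · simp only [Bool.not_eq_true] at h
    simp [h, PySem.Dict.getD_of_not_contains _ _ h]

theorem foldl_nested (l : List (List (String × Int))) (a : PySem.Dict String Int) :
    l.foldl (fun acc d => d.foldl (fun acc p => acc.insert p.1 (acc.getD p.1 0 + p.2)) acc) a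
      = (l.flatMap id).foldl (fun acc p => acc.insert p.1 (acc.getD p.1 0 + p.2)) a := by
  induction l generalizing a with
  | nil => rfl
  | cons d t ih => simp [List.foldl_append, ih]

theorem getD_foldl_step (L : List (String × Int)) (d : PySem.Dict String Int) (k : String) :
    (L.foldl (fun acc p => acc.insert p.1 (acc.getD p.1 0 + p.2)) d).getD k 0
      = d.getD k 0 + ((L.filter (fun p => p.1 == k)).map Prod.snd).sum := by
  induction L generalizing d with
  | nil => simp
  | cons p t ih =>
    simp only [List.foldl_cons, ih, PySem.Dict.getD_insert, List.filter_cons]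
    by_cases h : p.1 = k
    · simp [h]; ring
    · have hb : (p.1 == k) = false := by simp [h]
      simp [hb, Ne.symm h]

theorem getD_mk_eq_filter_sum (d : List (String × Int)) (k : String)
    (hnd : (d.map Prod.fst).Nodup) :
    (PySem.Dict.mk d).getD k 0 = ((d.filter (fun p => p.1 == k)).map Prod.snd).sum := by
  induction d with
  | nil => simp [PySem.Dict.getD_eq_get?_getD, PySem.Dict.get?]
  | cons p t ih =>
    simp only [List.map_cons, List.nodup_cons] at hnd
    rw [PySem.Dict.getD_eq_get?_getD, PySem.Dict.get?_mk_cons, List.filter_cons]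
    by_cases h : p.1 = k
    · have hnil : t.filter (fun q => q.1 == k) = [] := by
        apply List.filter_eq_nil_iff.mpr
        intro q hq
        simp only [beq_iff_eq]
        intro hk
        exact hnd.1 (by rw [h, ← hk]; exact List.mem_map_of_mem hq)
      simp [h, hnil]
    · have hb : (p.1 == k) = false := by simp [h]
      rw [hb]
      simp only [Bool.false_eq_true, if_false]
      rw [← PySem.Dict.getD_eq_get?_getD, ih hnd.2]

theorem foldl_add_int (l : List (List (String × Int))) (g : List (String × Int) → Int) (s : Int) :
    l.foldl (fun s d => s + g d) s = s + (l.map g).sum := by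
  induction l generalizing s with
  | nil => simp
  | cons d t ih => simp [ih]; ring

theorem key_sum (l : List (List (String × Int))) (k : String)
    (hnd : ∀ d ∈ l, (d.map Prod.fst).Nodup) :
    l.foldl (fun s d => s + (PySem.Dict.mk d).getD k 0) 0
      = (((l.flatMap id).filter (fun p => p.1 == k)).map Prod.snd).sum := by
  rw [foldl_add_int]
  induction l with
  | nil => simp
  | cons d t ih =>
    simp only [List.map_cons, List.sum_cons, List.flatMap_cons, List.filter_append,
      List.map_append, List.sum_append, id]
    rw [getD_mk_eq_filter_sum d k (hnd d (List.mem_cons_self))]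
    have h2 := ih (fun d hd => hnd d (List.mem_cons_of_mem _ hd))
    omega

-- ===== VERDICT (by name: the statement is the Claim_ definition above) =====
theorem sum_operator_counts_spec : Claim_equal_sum_operator_counts := by
  intro l _ hpre
  unfold Spec_sum_operator_counts sum_operator_counts sum_operator_counts_alt
  have hstep : (fun (acc : PySem.Dict String Int) (p : String × Int) =>
      if acc.contains p.1 then acc.insert p.1 (acc.getD p.1 0 + p.2) else acc.insert p.1 p.2)
      = fun acc p => acc.insert p.1 (acc.getD p.1 0 + p.2) := by
    funext acc p; exact stepA_eq acc p
  simp only [hstep]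
  rw [show (l.foldl (fun acc d => d.foldl (fun acc p => acc.insert p.1 (acc.getD p.1 0 + p.2)) acc)
        (PySem.Dict.empty : PySem.Dict String Int)) =
      ((l.flatMap id).foldl (fun acc p => acc.insert p.1 (acc.getD p.1 0 + p.2))
        (PySem.Dict.empty : PySem.Dict String Int)) from foldl_nested l _]
  set L := l.flatMap id with hL
  have hnodup : ((L.foldl (fun acc p => acc.insert p.1 (acc.getD p.1 0 + p.2)) PySem.Dict.empty)).keys.Nodup :=
    PySem.Dict.nodup_keys_foldl_insert_key L Prod.fst _ PySem.Dict.empty (by simp)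
  rw [PySem.Dict.items_eq_map_keys _ hnodup 0]
  rw [PySem.Dict.keys_foldl_insert_key]
  have hkeys : PySem.Set.update (PySem.Dict.empty : PySem.Dict String Int).keys (L.map Prod.fst)
      = PySem.List.dedup (l.flatMap (fun d => d.map Prod.fst)) := by
    simp [PySem.Set.update, PySem.Set.ofList, PySem.List.dedup_eq_ofList, hL]
    rfl
  rw [hkeys]
  apply List.map_congr_left
  intro k _
  rw [getD_foldl_step, key_sum l k hpre, ← hL]
  simp
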